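-- pv_equiv track=rewrite | github.com/polyipseity/information | .agents/skills/academic-notes/check_mods/rules.py | _scan_cloze_tokens
-- ===== SOURCE A (Python) =====
-- def _scan_cloze_tokens(
--     text: str,
-- ) -> tuple[
--     list[tuple[str, int]],
--     list[tuple[int, int]],
--     list[int],
--     list[int],
--     list[int],
-- ]:
--     """Scan cloze tokens and return token stream with structural diagnostics.
--
--     Returns:
--       - tokens: list of ("open"|"close", absolute_index)
--       - spans: matched cloze spans as (open_index, close_index)
--       - unmatched_open: opening token indices left unclosed
--       - unmatched_close: closing token indices without opening
--       - nested_open: opening token indices encountered while already inside a cloze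
--     """
--     tokens: list[tuple[str, int]] = []
--     spans: list[tuple[int, int]] = []
--     stack: list[int] = []
--     unmatched_close: list[int] = []
--     nested_open: list[int] = []
--
--     i = 0
--     n = len(text)
--     while i < n:
--         if text.startswith("{@{", i):
--             if stack:
--                 nested_open.append(i)
--             stack.append(i)
--             tokens.append(("open", i))
--             i += 3
--             continue
--         if text.startswith("}@}", i):
--             tokens.append(("close", i))
--             if stack:
--                 spans.append((stack.pop(), i))
--             else:
--                 unmatched_close.append(i)
--             i += 3
--             continue
--         i += 1
--
--     unmatched_open = stack.copy()
--     return tokens, spans, unmatched_open, unmatched_close, nested_open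
-- ===== SOURCE B (Python) =====
-- def _tokenize(text):
--     """Phase 1: discover the token stream only (no matching logic)."""
--     tokens = []
--     i = 0
--     n = len(text)
--     while i < n:
--         if text.startswith("{@{", i):
--             tokens.append(("open", i))
--             i += 3
--         elif text.startswith("}@}", i):
--             tokens.append(("close", i))
--             i += 3
--         else:
--             i += 1
--     return tokens
--
--
-- def _scan_cloze_tokens(text):
--     """Phase 2: fold a matching stack over the discovered token stream."""
--     tokens = _tokenize(text)
--     spans = []
--     stack = []
--     unmatched_close = []
--     nested_open = []
--     for kind, pos in tokens:
--         if kind == "open":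
--             if stack:
--                 nested_open.append(pos)
--             stack.append(pos)
--         elif stack:
--             spans.append((stack.pop(), pos))
--         else:
--             unmatched_close.append(pos)
--     return tokens, spans, stack, unmatched_close, nested_open
-- ===== Notes on version B (the rewrite author's own statement) =====
-- stated objective: alternative
-- what changed: Splits A's single fused loop (which interleaves token discovery with stack matching across five accumulators) into two phases: a tokenizer pass that only discovers the token stream, then a separate stack fold over that stream; same O(n) cost.
import Mathlib
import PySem

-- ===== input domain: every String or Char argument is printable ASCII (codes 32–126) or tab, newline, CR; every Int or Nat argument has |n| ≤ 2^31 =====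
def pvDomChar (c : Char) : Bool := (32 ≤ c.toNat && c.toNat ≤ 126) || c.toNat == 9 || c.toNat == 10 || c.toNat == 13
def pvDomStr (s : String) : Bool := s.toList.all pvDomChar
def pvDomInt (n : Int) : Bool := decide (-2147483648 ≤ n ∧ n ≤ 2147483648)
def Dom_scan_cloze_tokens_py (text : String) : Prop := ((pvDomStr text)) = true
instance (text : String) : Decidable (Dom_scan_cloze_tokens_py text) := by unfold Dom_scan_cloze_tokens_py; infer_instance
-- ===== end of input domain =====

-- B splits A's fused scan into a token-discovery pass followed by a stack fold over the tokens (alternative decomposition, same cost).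

-- ===== PORT A =====
-- A's single while-loop: position scan carrying all five result accumulators plus the stack.
def scanAGo : List Char → Int → List (String × Int) → List (Int × Int) → List Int → List Int → List Int →
    (List (String × Int)) × (List (Int × Int)) × List Int × List Int × List Int
  | '{' :: '@' :: '{' :: rest, i, tokens, spans, stack, uc, no =>
      scanAGo rest (i + 3) (tokens ++ [("open", i)]) spans (stack ++ [i]) uc
        (if stack.isEmpty then no else no ++ [i])
  | '}' :: '@' :: '}' :: rest, i, tokens, spans, stack, uc, no =>
      match stack.getLast? with
      | some t => scanAGo rest (i + 3) (tokens ++ [("close", i)]) (spans ++ [(t, i)]) stack.dropLast uc no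
      | none   => scanAGo rest (i + 3) (tokens ++ [("close", i)]) spans stack (uc ++ [i]) no
  | _ :: rest, i, tokens, spans, stack, uc, no => scanAGo rest (i + 1) tokens spans stack uc no
  | [], _, tokens, spans, stack, uc, no => (tokens, spans, stack, uc, no)

def scan_cloze_tokens_py (text : String) : (List (String × Int)) × (List (Int × Int)) × List Int × List Int × List Int :=
  scanAGo text.toList 0 [] [] [] [] []

-- ===== PORT B =====
-- Phase 1 of B: discover the token stream only.
def tokGo : List Char → Int → List (String × Int) → List (String × Int)
  | '{' :: '@' :: '{' :: rest, i, acc => tokGo rest (i + 3) (acc ++ [("open", i)])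
  | '}' :: '@' :: '}' :: rest, i, acc => tokGo rest (i + 3) (acc ++ [("close", i)])
  | _ :: rest, i, acc => tokGo rest (i + 1) acc
  | [], _, acc => acc

-- Phase 2 of B: one step of the stack fold over a token.
def stepB (s : (List (Int × Int)) × List Int × List Int × List Int) (tk : String × Int) :
    (List (Int × Int)) × List Int × List Int × List Int :=
  let (spans, stack, uc, no) := s
  if tk.1 = "open" then
    (spans, stack ++ [tk.2], uc, if stack.isEmpty then no else no ++ [tk.2])
  else
    match stack.getLast? with
    | some t => (spans ++ [(t, tk.2)], stack.dropLast, uc, no)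
    | none   => (spans, stack, uc ++ [tk.2], no)

def scan_cloze_tokens_py_alt (text : String) : (List (String × Int)) × (List (Int × Int)) × List Int × List Int × List Int :=
  let tokens := tokGo text.toList 0 []
  match tokens.foldl stepB ([], [], [], []) with
  | (spans, stack, uc, no) => (tokens, spans, stack, uc, no)

-- ===== PRECONDITION & SPEC =====
def Spec_scan_cloze_tokens_py (text : String) (out : (List (String × Int)) × (List (Int × Int)) × List Int × List Int × List Int) : Prop := out = scan_cloze_tokens_py_alt text
instance (text : String) (out : (List (String × Int)) × (List (Int × Int)) × List Int × List Int × List Int) : Decidable (Spec_scan_cloze_tokens_py text out) := by unfold Spec_scan_cloze_tokens_py; infer_instance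

-- ===== CLAIM (what is proved, stated in full; the proofs are below) =====
def Claim_equal_scan_cloze_tokens_py : Prop := ∀ (text : String), Dom_scan_cloze_tokens_py text → Spec_scan_cloze_tokens_py text (scan_cloze_tokens_py text)

-- ===== LEMMAS AND PROOFS =====

-- The tokenizer's accumulator splits off.
theorem tokGo_key (cs : List Char) (i : Int) (acc : List (String × Int)) :
    ∀ acc' : List (String × Int), tokGo cs i (acc' ++ acc) = acc' ++ tokGo cs i acc := by
  induction cs, i, acc using tokGo.induct with
  | case1 rest i acc ih =>
      intro acc'
      rw [tokGo, List.append_assoc, ih, tokGo]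
  | case2 rest i acc ih =>
      intro acc'
      rw [tokGo, List.append_assoc, ih, tokGo]
  | case3 c rest i acc h1 h2 ih => intro acc'; rw [tokGo, ih, tokGo] <;> simp_all
  | case4 => intro acc'; simp [tokGo]

theorem tokGo_acc (cs : List Char) (i : Int) (acc : List (String × Int)) :
    tokGo cs i acc = acc ++ tokGo cs i [] := by
  simpa using tokGo_key cs i [] acc

-- Main invariant: A's fused scan equals B's tokenize-then-fold from any intermediate state.
theorem scanAGo_eq (cs : List Char) (i : Int) (tokens : List (String × Int))
    (spans : List (Int × Int)) (stack uc no : List Int) :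
    scanAGo cs i tokens spans stack uc no =
      (tokens ++ tokGo cs i [],
        ((tokGo cs i []).foldl stepB (spans, stack, uc, no)).1,
        ((tokGo cs i []).foldl stepB (spans, stack, uc, no)).2.1,
        ((tokGo cs i []).foldl stepB (spans, stack, uc, no)).2.2.1,
        ((tokGo cs i []).foldl stepB (spans, stack, uc, no)).2.2.2) := by
  induction cs, i, tokens, spans, stack, uc, no using scanAGo.induct with
  | case1 rest i tokens spans stack uc no ih =>
      rw [scanAGo, ih, tokGo]
      simp [tokGo_acc rest (i + 3) [("open", i)], stepB]
  | case2 rest i tokens spans stack uc no t ht ih =>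
      rw [scanAGo, ht]; dsimp only
      rw [ih, tokGo]
      simp [tokGo_acc rest (i + 3) [("close", i)], stepB, ht]
  | case3 rest i tokens spans stack uc no ht ih =>
      rw [scanAGo, ht]; dsimp only
      rw [ih, tokGo]
      simp [tokGo_acc rest (i + 3) [("close", i)], stepB, ht]
  | case4 c rest i tokens spans stack uc no h1 h2 ih =>
      rw [scanAGo, ih, tokGo] <;> simp_all
  | case5 i tokens spans stack uc no => simp [scanAGo, tokGo]

-- ===== VERDICT (by name: the statement is the Claim_ definition above) =====
theorem scan_cloze_tokens_py_spec : Claim_equal_scan_cloze_tokens_py := by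
  intro text _
  unfold Spec_scan_cloze_tokens_py scan_cloze_tokens_py scan_cloze_tokens_py_alt
  rw [scanAGo_eq]
  rfl
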